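-- pv_equiv track=rewrite | github.com/TheNitromeFan/baekjoon | 03826.py | indentation
-- ===== SOURCE A (Python) =====
-- def period_start_count(line):
--     ret = 0
--     while ret < len(line) and line[ret] == ".":
--         ret += 1
--     return ret
--
-- def valid_indentation(stylish, r, c, s):
--     indent = 0
--     small, medium, large = 0, 0, 0
--     for i in range(len(stylish) - 1):
--         line = stylish[i]
--         small += line.count("(") - line.count(")")
--         medium += line.count("{") - line.count("}")
--         large += line.count("[") - line.count("]")
--         if period_start_count(stylish[i + 1]) != r * small + c * medium + s * large:
--             return False
--     return True
--
-- def indentation(stylish):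
--     candidates = []
--     for r in range(1, 21):
--         for c in range(1, 21):
--             for s in range(1, 21):
--                 if valid_indentation(stylish, r, c, s):
--                     candidates.append((r, c, s))
--     return candidates
-- ===== SOURCE B (Python) =====
-- def indentation(stylish):
--     # Build the per-line constraints (a, b, l, t): after line i the running bracket
--     # balances must satisfy r*a + c*b + s*l = t, where t = leading dots of line i+1.
--     cons = []
--     sm = md = lg = 0
--     for prev, nxt in zip(stylish, stylish[1:]):
--         sm += prev.count("(") - prev.count(")")
--         md += prev.count("{") - prev.count("}")
--         lg += prev.count("[") - prev.count("]")
--         cons.append((sm, md, lg, len(nxt) - len(nxt.lstrip("."))))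
--     # Pick a pivot constraint with a nonzero [-coefficient and SOLVE it for s:
--     # for each (r, c) at most one s can work, so the s loop disappears.
--     pivot = next((q for q in cons if q[2] != 0), None)
--     res = []
--     if pivot is None:
--         # s never occurs in any constraint: every s in 1..20 works iff (r, c) does.
--         for r in range(1, 21):
--             for c in range(1, 21):
--                 if all(r * a + c * b == t for (a, b, l, t) in cons):
--                     res.extend((r, c, s) for s in range(1, 21))
--     else:
--         a0, b0, l0, t0 = pivot
--         for r in range(1, 21):
--             for c in range(1, 21):
--                 num = t0 - a0 * r - b0 * c
--                 if num % l0 == 0: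
--                     s = num // l0
--                     if 1 <= s <= 20 and all(r * a + c * b + s * l == t
--                                             for (a, b, l, t) in cons):
--                         res.append((r, c, s))
--     return res
-- ===== Notes on version B (the rewrite author's own statement) =====
-- stated objective: faster
-- what changed: B builds the per-line (bracket-balance, indent) constraints once and then SOLVES the first constraint with a nonzero s-coefficient for s, so the s loop disappears: 400 (r,c) pairs each yield at most one candidate s checked against the constraint list (if no constraint mentions s, all s work at once), instead of A re-scanning and re-counting every line for each of 8000 triples.
import Mathlib
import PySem

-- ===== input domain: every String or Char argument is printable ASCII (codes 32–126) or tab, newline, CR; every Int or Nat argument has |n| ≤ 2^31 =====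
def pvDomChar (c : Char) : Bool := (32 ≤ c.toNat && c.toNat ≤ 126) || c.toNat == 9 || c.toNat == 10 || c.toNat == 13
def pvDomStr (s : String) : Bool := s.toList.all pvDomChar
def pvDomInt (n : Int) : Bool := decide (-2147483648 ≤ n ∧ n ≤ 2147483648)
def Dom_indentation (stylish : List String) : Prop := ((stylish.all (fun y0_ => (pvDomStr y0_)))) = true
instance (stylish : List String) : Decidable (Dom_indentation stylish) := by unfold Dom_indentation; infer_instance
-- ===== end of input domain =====

-- B builds the constraint list once and then SOLVES a pivot constraint for s, so the s loop
-- disappears (400 pairs, each with at most one candidate s), instead of testing 8000 triples (objective: faster).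

-- ===== PORT A =====
-- period_start_count: the while loop counts the leading '.' characters
def periodGo : List Char → Int
  | [] => 0
  | ch :: rest => if ch = '.' then 1 + periodGo rest else 0

def periodStartCount (line : String) : Int := periodGo line.toList

-- the 'for i in range(len(stylish)-1)' loop of valid_indentation, carrying the running sums;
-- 'prev' is stylish[i], the head of the remaining list is stylish[i+1]
def validGo (r c s : Int) (prev : String) (sm md lg : Int) : List String → Bool
  | [] => true
  | nxt :: rest =>
    let sm' := sm + (PySem.Str.count prev "(" : Int) - (PySem.Str.count prev ")" : Int)
    let md' := md + (PySem.Str.count prev "{" : Int) - (PySem.Str.count prev "}" : Int)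
    let lg' := lg + (PySem.Str.count prev "[" : Int) - (PySem.Str.count prev "]" : Int)
    if periodStartCount nxt ≠ r * sm' + c * md' + s * lg' then false
    else validGo r c s nxt sm' md' lg' rest

def validIndentation (stylish : List String) (r c s : Int) : Bool :=
  match stylish with
  | [] => true
  | first :: rest => validGo r c s first 0 0 0 rest

def indentation (stylish : List String) : List (List Int) :=
  (PySem.List.pyRange 1 21 1).foldl (fun cand r =>
    (PySem.List.pyRange 1 21 1).foldl (fun cand c =>
      (PySem.List.pyRange 1 21 1).foldl (fun cand s =>
        if validIndentation stylish r c s then cand ++ [[r, c, s]] else cand) cand) cand) []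

-- ===== PORT B =====
-- len(nxt) - len(nxt.lstrip(".")): dropWhile on the char list is exact for lstrip with this one-char set
def leadDots (line : String) : Int :=
  (line.toList.length : Int) - ((line.toList.dropWhile (· == '.')).length : Int)

-- loop body of B's single pass over zip(stylish, stylish[1:])
def consStep (st : Int × Int × Int × List (Int × Int × Int × Int)) (pq : String × String) :
    Int × Int × Int × List (Int × Int × Int × Int) :=
  let sm := st.1 + (PySem.Str.count pq.1 "(" : Int) - (PySem.Str.count pq.1 ")" : Int)
  let md := st.2.1 + (PySem.Str.count pq.1 "{" : Int) - (PySem.Str.count pq.1 "}" : Int)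
  let lg := st.2.2.1 + (PySem.Str.count pq.1 "[" : Int) - (PySem.Str.count pq.1 "]" : Int)
  (sm, md, lg, st.2.2.2 ++ [(sm, md, lg, leadDots pq.2)])

def constraintsOf (stylish : List String) : List (Int × Int × Int × Int) :=
  ((stylish.zip (stylish.drop 1)).foldl consStep (0, 0, 0, ([] : List (Int × Int × Int × Int)))).2.2.2

-- next((q for q in cons if q[2] != 0), None) is find?; then the two branches of Source B
def indentation_alt (stylish : List String) : List (List Int) :=
  let cons := constraintsOf stylish
  match cons.find? (fun q => q.2.2.1 != 0) with
  | none =>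
    (PySem.List.pyRange 1 21 1).foldl (fun res r =>
      (PySem.List.pyRange 1 21 1).foldl (fun res c =>
        if cons.all (fun q => r * q.1 + c * q.2.1 == q.2.2.2) then
          res ++ (PySem.List.pyRange 1 21 1).map (fun s => [r, c, s])
        else res) res) []
  | some q0 =>
    (PySem.List.pyRange 1 21 1).foldl (fun res r =>
      (PySem.List.pyRange 1 21 1).foldl (fun res c =>
        let num := q0.2.2.2 - q0.1 * r - q0.2.1 * c
        if PySem.Int.mod num q0.2.2.1 == 0 then
          let s := PySem.Int.floordiv num q0.2.2.1
          if 1 ≤ s ∧ s ≤ 20 ∧ cons.all (fun q => r * q.1 + c * q.2.1 + s * q.2.2.1 == q.2.2.2)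
          then res ++ [[r, c, s]] else res
        else res) res) []

-- ===== PRECONDITION & SPEC =====
def Spec_indentation (stylish : List String) (out : List (List Int)) : Prop := out = indentation_alt stylish
instance (stylish : List String) (out : List (List Int)) : Decidable (Spec_indentation stylish out) := by unfold Spec_indentation; infer_instance

-- ===== CLAIM =====
def Claim_equal_indentation : Prop := ∀ (stylish : List String), Dom_indentation stylish → Spec_indentation stylish (indentation stylish)

-- ===== LEMMAS AND PROOFS =====

-- proof-side recursive form of B's constraint list
def consGo (prev : String) (sm md lg : Int) : List String → List (Int × Int × Int × Int)
  | [] => []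
  | nxt :: rest =>
    let sm' := sm + (PySem.Str.count prev "(" : Int) - (PySem.Str.count prev ")" : Int)
    let md' := md + (PySem.Str.count prev "{" : Int) - (PySem.Str.count prev "}" : Int)
    let lg' := lg + (PySem.Str.count prev "[" : Int) - (PySem.Str.count prev "]" : Int)
    (sm', md', lg', leadDots nxt) :: consGo nxt sm' md' lg' rest

theorem periodGo_eq (cs : List Char) :
    periodGo cs = (cs.length : Int) - ((cs.dropWhile (· == '.')).length : Int) := by
  induction cs with
  | nil => simp [periodGo]
  | cons ch rest ih =>
    by_cases h : ch = '.'
    · simp [periodGo, h, ih]; ring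
    · simp [periodGo, h]

theorem periodStartCount_eq (line : String) : periodStartCount line = leadDots line := by
  simp [periodStartCount, leadDots, periodGo_eq]

theorem consStep_fold (rest : List String) : ∀ (prev : String) (sm md lg : Int)
    (acc : List (Int × Int × Int × Int)),
    (((prev :: rest).zip rest).foldl consStep (sm, md, lg, acc)).2.2.2 =
      acc ++ consGo prev sm md lg rest := by
  induction rest with
  | nil => intros; simp [consGo]
  | cons nxt rest' ih =>
    intro prev sm md lg acc
    simp only [List.zip_cons_cons, List.foldl_cons, consStep, consGo]
    rw [ih]
    simp

theorem validGo_eq (r c s : Int) (rest : List String) : ∀ (prev : String) (sm md lg : Int),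
    validGo r c s prev sm md lg rest =
      (consGo prev sm md lg rest).all
        (fun q => r * q.1 + c * q.2.1 + s * q.2.2.1 == q.2.2.2) := by
  induction rest with
  | nil => intros; simp [validGo, consGo]
  | cons nxt rest' ih =>
    intro prev sm md lg
    simp only [validGo, consGo, List.all_cons]
    by_cases h : periodStartCount nxt = r * (sm + (PySem.Str.count prev "(" : Int) - (PySem.Str.count prev ")" : Int))
        + c * (md + (PySem.Str.count prev "{" : Int) - (PySem.Str.count prev "}" : Int))
        + s * (lg + (PySem.Str.count prev "[" : Int) - (PySem.Str.count prev "]" : Int))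
    · rw [if_neg (by simpa using h), ih]
      have h' : leadDots nxt = r * (sm + (PySem.Str.count prev "(" : Int) - (PySem.Str.count prev ")" : Int))
          + c * (md + (PySem.Str.count prev "{" : Int) - (PySem.Str.count prev "}" : Int))
          + s * (lg + (PySem.Str.count prev "[" : Int) - (PySem.Str.count prev "]" : Int)) := by
        rw [← periodStartCount_eq]; exact h
      simp [h']
    · rw [if_pos (by simpa using h)]
      have h' : ¬ (leadDots nxt = r * (sm + (PySem.Str.count prev "(" : Int) - (PySem.Str.count prev ")" : Int))
          + c * (md + (PySem.Str.count prev "{" : Int) - (PySem.Str.count prev "}" : Int))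
          + s * (lg + (PySem.Str.count prev "[" : Int) - (PySem.Str.count prev "]" : Int))) := by
        rw [← periodStartCount_eq]; exact h
      have h'' : (r * (sm + (PySem.Str.count prev "(" : Int) - (PySem.Str.count prev ")" : Int))
          + c * (md + (PySem.Str.count prev "{" : Int) - (PySem.Str.count prev "}" : Int))
          + s * (lg + (PySem.Str.count prev "[" : Int) - (PySem.Str.count prev "]" : Int)) == leadDots nxt) = false := by
        simp only [beq_eq_false_iff_ne, ne_eq]
        intro hx
        exact h' hx.symm
      rw [h'']
      simp

theorem valid_eq_all (stylish : List String) (r c s : Int) :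
    validIndentation stylish r c s =
      (constraintsOf stylish).all
        (fun q => r * q.1 + c * q.2.1 + s * q.2.2.1 == q.2.2.2) := by
  cases stylish with
  | nil => simp [validIndentation, constraintsOf]
  | cons first rest =>
    simp only [validIndentation, constraintsOf, List.drop_succ_cons, List.drop_zero]
    rw [consStep_fold rest first 0 0 0 []]
    simp [validGo_eq]

-- A in flatMap normal form over the constraint list
theorem indentation_eq_flat (stylish : List String) :
    indentation stylish =
      (PySem.List.pyRange 1 21 1).flatMap (fun r =>
        (PySem.List.pyRange 1 21 1).flatMap (fun c =>
          (PySem.List.pyRange 1 21 1).flatMap (fun s =>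
            if (constraintsOf stylish).all
                (fun q => r * q.1 + c * q.2.1 + s * q.2.2.1 == q.2.2.2)
            then [[r, c, s]] else []))) := by
  unfold indentation
  have hinner : ∀ (r c : Int) (acc : List (List Int)),
      (PySem.List.pyRange 1 21 1).foldl (fun cand s =>
        if validIndentation stylish r c s then cand ++ [[r, c, s]] else cand) acc =
      acc ++ (PySem.List.pyRange 1 21 1).flatMap (fun s =>
        if (constraintsOf stylish).all (fun q => r * q.1 + c * q.2.1 + s * q.2.2.1 == q.2.2.2)
        then [[r, c, s]] else []) := by
    intro r c acc
    rw [PySem.List.foldl_congr_mem _ _ (fun cand s =>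
      cand ++ (if (constraintsOf stylish).all (fun q => r * q.1 + c * q.2.1 + s * q.2.2.1 == q.2.2.2)
        then [[r, c, s]] else [])) _
      (by intro cand x _
          rw [valid_eq_all]
          by_cases hP : ((constraintsOf stylish).all
              fun q => r * q.1 + c * q.2.1 + x * q.2.2.1 == q.2.2.2) = true
          · simp [hP]
          · simp [hP])]
    exact PySem.List.foldl_append_eq_flatMap _ _ _
  have hmid : ∀ (r : Int) (acc : List (List Int)),
      (PySem.List.pyRange 1 21 1).foldl (fun cand c =>
        (PySem.List.pyRange 1 21 1).foldl (fun cand s =>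
          if validIndentation stylish r c s then cand ++ [[r, c, s]] else cand) cand) acc =
      acc ++ (PySem.List.pyRange 1 21 1).flatMap (fun c =>
        (PySem.List.pyRange 1 21 1).flatMap (fun s =>
          if (constraintsOf stylish).all (fun q => r * q.1 + c * q.2.1 + s * q.2.2.1 == q.2.2.2)
          then [[r, c, s]] else [])) := by
    intro r acc
    rw [PySem.List.foldl_congr_mem _ _ (fun cand c =>
      cand ++ (PySem.List.pyRange 1 21 1).flatMap (fun s =>
        if (constraintsOf stylish).all (fun q => r * q.1 + c * q.2.1 + s * q.2.2.1 == q.2.2.2)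
        then [[r, c, s]] else [])) _
      (by intro cand x _; exact hinner r x cand)]
    exact PySem.List.foldl_append_eq_flatMap _ _ _
  rw [PySem.List.foldl_congr_mem _ _ (fun cand r =>
    cand ++ (PySem.List.pyRange 1 21 1).flatMap (fun c =>
      (PySem.List.pyRange 1 21 1).flatMap (fun s =>
        if (constraintsOf stylish).all (fun q => r * q.1 + c * q.2.1 + s * q.2.2.1 == q.2.2.2)
        then [[r, c, s]] else []))) _
    (by intro cand x _; exact hmid x cand)]
  rw [PySem.List.foldl_append_eq_flatMap]
  simp

theorem all_congr' {α : Type} (l : List α) (f g : α → Bool) (h : ∀ x ∈ l, f x = g x) :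
    l.all f = l.all g := by
  induction l with
  | nil => rfl
  | cons a t ih =>
    simp only [List.all_cons, h a (List.mem_cons_self), ih (fun x hx => h x (List.mem_cons_of_mem a hx))]

theorem flatMap_unique (L : List Int) (hL : L.Nodup) (p : Int → Bool) (x : Int → List (List Int))
    (s0 : Int) (h : ∀ s, p s = true → s = s0) :
    L.flatMap (fun s => if p s then x s else []) =
      if s0 ∈ L ∧ p s0 = true then x s0 else [] := by
  induction L with
  | nil => simp
  | cons a t ih =>
    simp only [List.nodup_cons] at hL
    rw [List.flatMap_cons, ih hL.2]
    by_cases hp : p a = true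
    · have ha : a = s0 := h a hp
      subst ha
      simp [hp, hL.1]
    · have hne : a = s0 → p s0 ≠ true := fun he => he ▸ hp
      by_cases hm : s0 ∈ t
      · rw [if_neg hp]
        by_cases hps : p s0 = true
        · rw [if_pos ⟨hm, hps⟩, if_pos ⟨List.mem_cons_of_mem a hm, hps⟩, List.nil_append]
        · rw [if_neg (by rintro ⟨_, hx⟩; exact hps hx),
              if_neg (by rintro ⟨_, hx⟩; exact hps hx), List.nil_append]
      · have hout : ¬ (s0 ∈ a :: t ∧ p s0 = true) := by
          rintro ⟨hmem, hps⟩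
          rcases List.mem_cons.mp hmem with he | ht
          · exact hne he.symm hps
          · exact hm ht
        rw [if_neg hp, if_neg (by rintro ⟨hmem, _⟩; exact hm hmem), if_neg hout, List.nil_append]

theorem flatMap_const_cond (L : List Int) (P : Prop) [Decidable P] (x : Int → List (List Int)) :
    L.flatMap (fun s => if P then x s else []) = if P then L.flatMap x else [] := by
  by_cases hP : P
  · simp [hP]
  · simp [hP]

theorem flatMap_pair_singleton (L : List Int) (f : Int → List Int) :
    L.flatMap (fun s => [f s]) = L.map f := by
  induction L with
  | nil => rfl
  | cons a t ih => simp [ih]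


theorem indentation_spec : Claim_equal_indentation := by
  intro stylish _
  unfold Spec_indentation
  rw [indentation_eq_flat]
  cases hf : (constraintsOf stylish).find? (fun q => q.2.2.1 != 0) with
  | none =>
    simp only [indentation_alt, hf]
    -- every constraint has l = 0
    have hzero : ∀ q ∈ constraintsOf stylish, q.2.2.1 = 0 := by
      intro q hq
      have := List.find?_eq_none.mp hf q hq
      simpa using this
    have hbody : ∀ r c : Int,
        (PySem.List.pyRange 1 21 1).flatMap (fun s =>
          if (constraintsOf stylish).all (fun q => r * q.1 + c * q.2.1 + s * q.2.2.1 == q.2.2.2)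
          then [[r, c, s]] else []) =
        (if (constraintsOf stylish).all (fun q => r * q.1 + c * q.2.1 == q.2.2.2)
          then (PySem.List.pyRange 1 21 1).map (fun s => [r, c, s]) else []) := by
      intro r c
      have hall : ∀ s : Int,
          (constraintsOf stylish).all (fun q => r * q.1 + c * q.2.1 + s * q.2.2.1 == q.2.2.2) =
          (constraintsOf stylish).all (fun q => r * q.1 + c * q.2.1 == q.2.2.2) := by
        intro s
        apply all_congr'
        intro q hq
        rw [hzero q hq]
        ring_nf
      have hfun : (fun s => if (constraintsOf stylish).all
            (fun q => r * q.1 + c * q.2.1 + s * q.2.2.1 == q.2.2.2) then [[r, c, s]] else []) =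
          (fun s : Int => if (constraintsOf stylish).all
            (fun q => r * q.1 + c * q.2.1 == q.2.2.2) then [[r, c, s]] else []) := by
        funext s
        rw [hall s]
      rw [hfun, flatMap_const_cond]
      by_cases hP : (constraintsOf stylish).all (fun q => r * q.1 + c * q.2.1 == q.2.2.2) = true
      · rw [if_pos hP, if_pos hP, flatMap_pair_singleton]
      · rw [if_neg hP, if_neg hP]
    have hinner : ∀ (r : Int) (acc : List (List Int)),
        (PySem.List.pyRange 1 21 1).foldl (fun res c =>
          if (constraintsOf stylish).all (fun q => r * q.1 + c * q.2.1 == q.2.2.2) then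
            res ++ (PySem.List.pyRange 1 21 1).map (fun s => [r, c, s])
          else res) acc =
        acc ++ (PySem.List.pyRange 1 21 1).flatMap (fun c =>
          if (constraintsOf stylish).all (fun q => r * q.1 + c * q.2.1 == q.2.2.2) then
            (PySem.List.pyRange 1 21 1).map (fun s => [r, c, s]) else []) := by
      intro r acc
      rw [PySem.List.foldl_congr_mem _ _ (fun res c =>
        res ++ (if (constraintsOf stylish).all (fun q => r * q.1 + c * q.2.1 == q.2.2.2) then
          (PySem.List.pyRange 1 21 1).map (fun s => [r, c, s]) else [])) _
        (by intro res x _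
            by_cases hP : (constraintsOf stylish).all (fun q => r * q.1 + x * q.2.1 == q.2.2.2) = true
            · simp [hP]
            · simp [hP])]
      exact PySem.List.foldl_append_eq_flatMap _ _ _
    rw [PySem.List.foldl_congr_mem _ _ (fun res r =>
      res ++ (PySem.List.pyRange 1 21 1).flatMap (fun c =>
        if (constraintsOf stylish).all (fun q => r * q.1 + c * q.2.1 == q.2.2.2) then
          (PySem.List.pyRange 1 21 1).map (fun s => [r, c, s]) else [])) _
      (by intro res x _; exact hinner x res)]
    rw [PySem.List.foldl_append_eq_flatMap]
    rw [List.nil_append]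
    exact congrArg (fun f => List.flatMap f (PySem.List.pyRange 1 21 1))
      (funext fun r => congrArg (fun g => List.flatMap g (PySem.List.pyRange 1 21 1))
        (funext fun c => hbody r c))
  | some q0 =>
    simp only [indentation_alt, hf]
    have hq0mem : q0 ∈ constraintsOf stylish := List.mem_of_find?_eq_some hf
    have hl0 : q0.2.2.1 ≠ 0 := by
      have := List.find?_some hf
      simpa using this
    have hbody : ∀ r c : Int,
        (PySem.List.pyRange 1 21 1).flatMap (fun s =>
          if (constraintsOf stylish).all (fun q => r * q.1 + c * q.2.1 + s * q.2.2.1 == q.2.2.2)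
          then [[r, c, s]] else []) =
        (if PySem.Int.mod (q0.2.2.2 - q0.1 * r - q0.2.1 * c) q0.2.2.1 == 0 then
          (if 1 ≤ PySem.Int.floordiv (q0.2.2.2 - q0.1 * r - q0.2.1 * c) q0.2.2.1 ∧
              PySem.Int.floordiv (q0.2.2.2 - q0.1 * r - q0.2.1 * c) q0.2.2.1 ≤ 20 ∧
              (constraintsOf stylish).all (fun q => r * q.1 + c * q.2.1 +
                PySem.Int.floordiv (q0.2.2.2 - q0.1 * r - q0.2.1 * c) q0.2.2.1 * q.2.2.1 == q.2.2.2)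
           then [[r, c, PySem.Int.floordiv (q0.2.2.2 - q0.1 * r - q0.2.1 * c) q0.2.2.1]] else [])
         else []) := by
      intro r c
      have hkey : ∀ s : Int,
          (constraintsOf stylish).all (fun q => r * q.1 + c * q.2.1 + s * q.2.2.1 == q.2.2.2) = true →
          s * q0.2.2.1 = q0.2.2.2 - q0.1 * r - q0.2.1 * c := by
        intro s hs
        have := List.all_eq_true.mp hs q0 hq0mem
        have heq : r * q0.1 + c * q0.2.1 + s * q0.2.2.1 = q0.2.2.2 := by simpa using this
        linear_combination heq
      have huniq : ∀ s : Int,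
          (constraintsOf stylish).all (fun q => r * q.1 + c * q.2.1 + s * q.2.2.1 == q.2.2.2) = true →
          s = PySem.Int.floordiv (q0.2.2.2 - q0.1 * r - q0.2.1 * c) q0.2.2.1 ∧
          PySem.Int.mod (q0.2.2.2 - q0.1 * r - q0.2.1 * c) q0.2.2.1 = 0 := by
        intro s hs
        have hmul := hkey s hs
        have hd : q0.2.2.1 ∣ (q0.2.2.2 - q0.1 * r - q0.2.1 * c) := ⟨s, by rw [← hmul]; ring⟩
        have hm0 : PySem.Int.mod (q0.2.2.2 - q0.1 * r - q0.2.1 * c) q0.2.2.1 = 0 :=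
          (PySem.Int.mod_eq_zero_iff_dvd _ _).mpr hd
        have hfm0 := PySem.Int.floordiv_mul_add_mod (q0.2.2.2 - q0.1 * r - q0.2.1 * c) q0.2.2.1
        rw [hm0, add_zero] at hfm0
        exact ⟨mul_right_cancel₀ hl0 (hmul.trans hfm0.symm), hm0⟩
      rw [flatMap_unique (PySem.List.pyRange 1 21 1) (PySem.List.nodup_pyRange_one 1 21)
        (fun s => (constraintsOf stylish).all (fun q => r * q.1 + c * q.2.1 + s * q.2.2.1 == q.2.2.2))
        (fun s => [[r, c, s]])
        (PySem.Int.floordiv (q0.2.2.2 - q0.1 * r - q0.2.1 * c) q0.2.2.1)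
        (fun s hs => (huniq s hs).1)]
      by_cases hm : PySem.Int.mod (q0.2.2.2 - q0.1 * r - q0.2.1 * c) q0.2.2.1 = 0
      · rw [if_pos (show (PySem.Int.mod (q0.2.2.2 - q0.1 * r - q0.2.1 * c) q0.2.2.1 == 0) = true by
          simpa using hm)]
        simp only [PySem.List.mem_pyRange_one]
        by_cases hPs0 : (constraintsOf stylish).all (fun q => r * q.1 + c * q.2.1 +
            PySem.Int.floordiv (q0.2.2.2 - q0.1 * r - q0.2.1 * c) q0.2.2.1 * q.2.2.1 == q.2.2.2) = true
        · by_cases hb : (1 : Int) ≤ PySem.Int.floordiv (q0.2.2.2 - q0.1 * r - q0.2.1 * c) q0.2.2.1 ∧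
              PySem.Int.floordiv (q0.2.2.2 - q0.1 * r - q0.2.1 * c) q0.2.2.1 < 21
          · rw [if_pos ⟨hb, hPs0⟩, if_pos ⟨hb.1, by omega, hPs0⟩]
          · rw [if_neg (by rintro ⟨hbb, _⟩; exact hb hbb),
                if_neg (by rintro ⟨h1, h2, _⟩; exact hb ⟨h1, by omega⟩)]
        · rw [if_neg (by rintro ⟨_, hp⟩; exact hPs0 hp),
              if_neg (by rintro ⟨_, _, hp⟩; exact hPs0 hp)]
      · rw [if_neg (show ¬ ((PySem.Int.mod (q0.2.2.2 - q0.1 * r - q0.2.1 * c) q0.2.2.1 == 0) = true) by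
            simpa using hm),
          if_neg (by rintro ⟨_, hp⟩; exact hm (huniq _ hp).2)]
    have hinner : ∀ (r : Int) (acc : List (List Int)),
        (PySem.List.pyRange 1 21 1).foldl (fun res c =>
          if PySem.Int.mod (q0.2.2.2 - q0.1 * r - q0.2.1 * c) q0.2.2.1 == 0 then
            if 1 ≤ PySem.Int.floordiv (q0.2.2.2 - q0.1 * r - q0.2.1 * c) q0.2.2.1 ∧
                PySem.Int.floordiv (q0.2.2.2 - q0.1 * r - q0.2.1 * c) q0.2.2.1 ≤ 20 ∧
                (constraintsOf stylish).all (fun q => r * q.1 + c * q.2.1 +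
                  PySem.Int.floordiv (q0.2.2.2 - q0.1 * r - q0.2.1 * c) q0.2.2.1 * q.2.2.1 == q.2.2.2)
            then res ++ [[r, c, PySem.Int.floordiv (q0.2.2.2 - q0.1 * r - q0.2.1 * c) q0.2.2.1]] else res
          else res) acc =
        acc ++ (PySem.List.pyRange 1 21 1).flatMap (fun c =>
          if PySem.Int.mod (q0.2.2.2 - q0.1 * r - q0.2.1 * c) q0.2.2.1 == 0 then
            (if 1 ≤ PySem.Int.floordiv (q0.2.2.2 - q0.1 * r - q0.2.1 * c) q0.2.2.1 ∧
                PySem.Int.floordiv (q0.2.2.2 - q0.1 * r - q0.2.1 * c) q0.2.2.1 ≤ 20 ∧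
                (constraintsOf stylish).all (fun q => r * q.1 + c * q.2.1 +
                  PySem.Int.floordiv (q0.2.2.2 - q0.1 * r - q0.2.1 * c) q0.2.2.1 * q.2.2.1 == q.2.2.2)
             then [[r, c, PySem.Int.floordiv (q0.2.2.2 - q0.1 * r - q0.2.1 * c) q0.2.2.1]] else [])
          else []) := by
      intro r acc
      rw [PySem.List.foldl_congr_mem _ _ (fun res c =>
        res ++ (if PySem.Int.mod (q0.2.2.2 - q0.1 * r - q0.2.1 * c) q0.2.2.1 == 0 then
          (if 1 ≤ PySem.Int.floordiv (q0.2.2.2 - q0.1 * r - q0.2.1 * c) q0.2.2.1 ∧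
              PySem.Int.floordiv (q0.2.2.2 - q0.1 * r - q0.2.1 * c) q0.2.2.1 ≤ 20 ∧
              (constraintsOf stylish).all (fun q => r * q.1 + c * q.2.1 +
                PySem.Int.floordiv (q0.2.2.2 - q0.1 * r - q0.2.1 * c) q0.2.2.1 * q.2.2.1 == q.2.2.2)
           then [[r, c, PySem.Int.floordiv (q0.2.2.2 - q0.1 * r - q0.2.1 * c) q0.2.2.1]] else [])
          else [])) _
        (by intro res x _
            dsimp only
            by_cases hm : (PySem.Int.mod (q0.2.2.2 - q0.1 * r - q0.2.1 * x) q0.2.2.1 == 0) = true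
            · by_cases hc : (1 ≤ PySem.Int.floordiv (q0.2.2.2 - q0.1 * r - q0.2.1 * x) q0.2.2.1 ∧
                  PySem.Int.floordiv (q0.2.2.2 - q0.1 * r - q0.2.1 * x) q0.2.2.1 ≤ 20 ∧
                  (constraintsOf stylish).all (fun q => r * q.1 + x * q.2.1 +
                    PySem.Int.floordiv (q0.2.2.2 - q0.1 * r - q0.2.1 * x) q0.2.2.1 * q.2.2.1 == q.2.2.2) = true)
              · rw [if_pos hm, if_pos hc, if_pos hm, if_pos hc]
              · rw [if_pos hm, if_neg hc, if_pos hm, if_neg hc, List.append_nil]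
            · rw [if_neg hm, if_neg hm, List.append_nil])]
      exact PySem.List.foldl_append_eq_flatMap _ _ _
    rw [PySem.List.foldl_congr_mem _ _ (fun res r =>
      res ++ (PySem.List.pyRange 1 21 1).flatMap (fun c =>
        if PySem.Int.mod (q0.2.2.2 - q0.1 * r - q0.2.1 * c) q0.2.2.1 == 0 then
          (if 1 ≤ PySem.Int.floordiv (q0.2.2.2 - q0.1 * r - q0.2.1 * c) q0.2.2.1 ∧
              PySem.Int.floordiv (q0.2.2.2 - q0.1 * r - q0.2.1 * c) q0.2.2.1 ≤ 20 ∧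
              (constraintsOf stylish).all (fun q => r * q.1 + c * q.2.1 +
                PySem.Int.floordiv (q0.2.2.2 - q0.1 * r - q0.2.1 * c) q0.2.2.1 * q.2.2.1 == q.2.2.2)
           then [[r, c, PySem.Int.floordiv (q0.2.2.2 - q0.1 * r - q0.2.1 * c) q0.2.2.1]] else [])
        else [])) _
      (by intro res x _; exact hinner x res)]
    rw [PySem.List.foldl_append_eq_flatMap]
    rw [List.nil_append]
    exact congrArg (fun f => List.flatMap f (PySem.List.pyRange 1 21 1))
      (funext fun r => congrArg (fun g => List.flatMap g (PySem.List.pyRange 1 21 1))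
        (funext fun c => hbody r c))
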